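-- pv_equiv track=rewrite | github.com/DPDominika/LOGIA---IT-competition | etap II/zad.3_08_2_wersja_2.py | MAXX
-- ===== SOURCE A (Python) =====
-- def MAXX(słowo):
--     """gdzie :słowo jest dowolnym niepustym słowem składającym się jedynie
--     z małych liter alfabetu łacińskiego. Wynikiem funkcji jest najdłuższe
--     podsłowo (fragment słowa - ciąg kolejnych znaków), które rozpoczyna się
--     i kończy się tym samym znakiem. Jeśli w danym słowie jest wiele takich
--     najdłuższych podsłów, to wynikiem jest dowolne z nich."""
--
--     podsł = []
--     dł = []
--     n = 0
--
--     while n <= len(słowo)-1: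
--         n+=1
--         for i in range(len(słowo)):
--             if (słowo[i:(i+n)])[0] == (słowo[i:(i+n)])[-1]:
--                 podsł.append(słowo[i:(i+n)])
--
--     for j in range(len(podsł)):
--         dł.append(len(podsł[j]))
--
--     return podsł[(dł.index(max(dł)))]
-- ===== SOURCE B (Python) =====
-- def MAXX(słowo):
--     """One pass: for each position j, the longest candidate ending at j starts
--     at the first occurrence of słowo[j]; keep the best (strictly longer) one."""
--     first = {}
--     best_len = 0
--     best_start = 0
--     for j, c in enumerate(słowo):
--         i = first.setdefault(c, j)
--         if j - i + 1 > best_len: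
--             best_len = j - i + 1
--             best_start = i
--     return słowo[best_start:best_start + best_len]
-- ===== Notes on version B (the rewrite author's own statement) =====
-- stated objective: faster
-- what changed: Replaces A's enumerate-all-substrings loop (every window length times every start, collecting a candidate list, then len/max/index passes) by a single left-to-right pass that records each character's first occurrence in a dict and keeps the strictly longest first-occurrence-to-current-position span.
import Mathlib
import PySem

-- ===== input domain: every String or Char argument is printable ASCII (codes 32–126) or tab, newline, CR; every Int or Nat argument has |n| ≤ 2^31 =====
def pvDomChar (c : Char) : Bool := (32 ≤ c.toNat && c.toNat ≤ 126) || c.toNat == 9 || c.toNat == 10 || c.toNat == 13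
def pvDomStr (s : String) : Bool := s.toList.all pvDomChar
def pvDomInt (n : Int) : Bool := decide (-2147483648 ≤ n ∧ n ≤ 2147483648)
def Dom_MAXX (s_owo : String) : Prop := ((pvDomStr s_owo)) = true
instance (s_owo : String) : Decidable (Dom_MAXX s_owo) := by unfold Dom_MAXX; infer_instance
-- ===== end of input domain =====

-- B replaces A's enumerate-all-substrings-then-pick-max scan by one pass tracking each
-- character's first occurrence (objective: faster; a timing run measures the speed-up).

-- ===== PORT A =====
def MAXX (s_owo : String) : String :=
  let l := s_owo.toList
  -- while n <= len-1: n += 1; for i in range(len): if s[i:i+n][0] == s[i:i+n][-1]: append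
  let podsl : List (List Char) :=
    (PySem.List.pyRange 1 ((l.length : Int) + 1)).foldl (fun acc n =>
      (PySem.List.pyRange 0 (l.length : Int)).foldl (fun acc2 i =>
        let sub := PySem.List.slice l (some i) (some (i + n))
        match PySem.List.pyGet? sub 0, PySem.List.pyGet? sub (-1) with
        | some a, some b => if a == b then acc2 ++ [sub] else acc2
        | _, _ => acc2) acc) []
  -- for j in range(len(podsł)): dł.append(len(podsł[j]))
  let dl : List Int := podsl.foldl (fun acc w => acc ++ [(w.length : Int)]) []
  -- return podsł[dł.index(max(dł))]
  match PySem.List.max? dl (fun x => x) with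
  | some m =>
    match PySem.List.index? dl m with
    | some k => String.ofList ((PySem.List.pyGet? podsl (k : Int)).getD [])
    | none => ""        -- unreachable: the max is a member
  | none => ""          -- Python: max([]) raises ValueError; excluded by Pre_MAXX

-- ===== PORT B =====
def MAXX_alt (s_owo : String) : String :=
  let l := s_owo.toList
  let st : PySem.Dict Char Int × Int × Int :=
    (PySem.List.enumerate l).foldl
      (fun acc jc =>
        let i := (acc.1.get? jc.2).getD jc.1
        let first := acc.1.setdefault jc.2 jc.1
        if acc.2.1 < jc.1 - i + 1 then (first, jc.1 - i + 1, i)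
        else (first, acc.2))
      (PySem.Dict.empty, 0, 0)
  PySem.Str.slice s_owo (some st.2.2) (some (st.2.2 + st.2.1))

-- ===== PRECONDITION & SPEC =====
-- Pre_ excludes only the empty string, on which A raises ValueError (max() of an empty list).
def Pre_MAXX (s_owo : String) : Prop := s_owo ≠ ""
instance (s_owo : String) : Decidable (Pre_MAXX s_owo) := by unfold Pre_MAXX; infer_instance
def pvWitness_MAXX : String := "abcab"

def Spec_MAXX (s_owo : String) (out : String) : Prop := out = MAXX_alt s_owo
instance (s_owo : String) (out : String) : Decidable (Spec_MAXX s_owo out) := by unfold Spec_MAXX; infer_instance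

-- ===== CLAIM (what is proved, stated in full; the proofs are below) =====
def Claim_equal_MAXX : Prop := ∀ (s_owo : String), Dom_MAXX s_owo → Pre_MAXX s_owo → Spec_MAXX s_owo (MAXX s_owo)
-- ===== LEMMAS AND PROOFS =====

-- ---- shared combinatorial reference: best span (max length, first start) ----

-- subw l i n = the Python slice l[i:i+n]
def subw (l : List Char) (i n : Nat) : List Char := (l.drop i).take n

-- first == last test on a window (false on the empty window, which A never hits)
def condW (w : List Char) : Bool :=
  match w.head?, w.getLast? with
  | some a, some b => a == b
  | _, _ => false

def blockL (l : List Char) (n : Nat) : List (List Char) :=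
  ((List.range l.length).filter (fun i => condW (subw l i n))).map (fun i => subw l i n)

def cands (l : List Char) : List (List Char) :=
  (List.range l.length).flatMap (fun m => blockL l (m + 1))

-- a good span of length L starting at i, lying within the first k characters
abbrev gs (l : List Char) (k i L : Nat) : Prop :=
  1 ≤ L ∧ i + L ≤ k ∧ l.getD i ' ' = l.getD (i + L - 1) ' '

abbrev bestLenK (l : List Char) (k : Nat) : Nat :=
  Nat.findGreatest (fun L => ∃ i, i < k ∧ gs l k i L) k

def bestStartK (l : List Char) (k : Nat) : Nat :=
  if h : ∃ i, i < k ∧ gs l k i (bestLenK l k) then Nat.find h else 0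

lemma gs_mono (l : List Char) (k k' i L : Nat) (hk : k ≤ k') (h : gs l k i L) :
    gs l k' i L := by
  obtain ⟨h1, h2, h3⟩ := h; exact ⟨h1, by omega, h3⟩

lemma bestLenK_le (l : List Char) (k : Nat) : bestLenK l k ≤ k :=
  Nat.findGreatest_le k

lemma bestLenK_is_greatest (l : List Char) (k L : Nat)
    (h : ∃ i, i < k ∧ gs l k i L) : L ≤ bestLenK l k := by
  obtain ⟨i, hi, hgs⟩ := h
  exact Nat.le_findGreatest (by omega) ⟨i, hi, hgs⟩

lemma bestLenK_pos (l : List Char) (k : Nat) (h : 1 ≤ k) : 1 ≤ bestLenK l k :=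
  bestLenK_is_greatest l k 1 ⟨0, by omega, le_refl 1, by omega, rfl⟩

lemma bestLenK_spec (l : List Char) (k : Nat) (h : 1 ≤ k) :
    ∃ i, i < k ∧ gs l k i (bestLenK l k) := by
  have h0 : (fun L => ∃ i, i < k ∧ gs l k i L) 1 := ⟨0, by omega, le_refl 1, by omega, rfl⟩
  exact Nat.findGreatest_spec (P := fun L => ∃ i, i < k ∧ gs l k i L) (m := 1) (by omega) h0

lemma bestLenK_zero (l : List Char) : bestLenK l 0 = 0 := by
  simp [bestLenK]

lemma bestStartK_zero (l : List Char) : bestStartK l 0 = 0 := by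
  simp [bestStartK]

lemma bestStartK_spec (l : List Char) (k : Nat) (h : 1 ≤ k) :
    bestStartK l k < k ∧ gs l k (bestStartK l k) (bestLenK l k) ∧
      ∀ i < bestStartK l k, ¬ gs l k i (bestLenK l k) := by
  have hex := bestLenK_spec l k h
  rw [bestStartK, dif_pos hex]
  refine ⟨(Nat.find_spec hex).1, (Nat.find_spec hex).2, fun i hi hgs => ?_⟩
  exact Nat.find_min hex hi ⟨by omega, hgs⟩

-- ---- facts about idxOf ----

lemma idxOf_le_of_getElem (l : List Char) (c : Char) (k : Nat) (hk : k < l.length)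
    (h : l[k] = c) : List.idxOf c l ≤ k := by
  have hmem : c ∈ l.take (k + 1) := by
    rw [List.take_succ_eq_append_getElem hk]; simp [h]
  have hcl : c ∈ l := List.mem_of_mem_take hmem
  have := (List.mem_take_iff_idxOf_lt hcl).1 hmem
  omega

lemma getD_eq_getElem' (l : List Char) (i : Nat) (h : i < l.length) :
    l.getD i ' ' = l[i] := List.getD_eq_getElem l ' ' h

-- ---- the step characterisation: extending the prefix by one character ----

lemma step_best (l : List Char) (k : Nat) (hk : k < l.length) :
    (bestLenK l k < k + 1 - List.idxOf (l.getD k ' ') l →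
      bestLenK l (k+1) = k + 1 - List.idxOf (l.getD k ' ') l ∧
      bestStartK l (k+1) = List.idxOf (l.getD k ' ') l) ∧
    (k + 1 - List.idxOf (l.getD k ' ') l ≤ bestLenK l k →
      bestLenK l (k+1) = bestLenK l k ∧ bestStartK l (k+1) = bestStartK l k) := by
  have hgetk : l.getD k ' ' = l[k] := getD_eq_getElem' l k hk
  have hc_mem : l.getD k ' ' ∈ l := by rw [hgetk]; exact List.getElem_mem hk
  have hi0lt : List.idxOf (l.getD k ' ') l < l.length := List.idxOf_lt_length_of_mem hc_mem
  have hi0le : List.idxOf (l.getD k ' ') l ≤ k :=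
    idxOf_le_of_getElem l _ k hk hgetk.symm
  have hgdi0 : l.getD (List.idxOf (l.getD k ' ') l) ' ' = l.getD k ' ' := by
    rw [getD_eq_getElem' l _ hi0lt]; exact List.getElem_idxOf hi0lt
  have hi0min : ∀ j, j < l.length → l.getD j ' ' = l.getD k ' ' →
      List.idxOf (l.getD k ' ') l ≤ j := fun j hj hgd =>
    idxOf_le_of_getElem l _ j hj (by rw [← getD_eq_getElem' l j hj]; exact hgd)
  have F1 : gs l (k+1) (List.idxOf (l.getD k ' ') l) (k + 1 - List.idxOf (l.getD k ' ') l) := by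
    refine ⟨by omega, by omega, ?_⟩
    rw [show List.idxOf (l.getD k ' ') l + (k + 1 - List.idxOf (l.getD k ' ') l) - 1 = k
      by omega]
    exact hgdi0
  have F2 : ∀ i L, i < k + 1 → gs l (k+1) i L →
      L ≤ max (bestLenK l k) (k + 1 - List.idxOf (l.getD k ' ') l) := by
    intro i L hi ⟨h1, h2, h3⟩
    rcases Nat.lt_or_ge (i + L) (k + 1) with hcase | hcase
    · have : L ≤ bestLenK l k :=
        bestLenK_is_greatest l k L ⟨i, by omega, h1, by omega, h3⟩
      omega
    · have hik : i + L = k + 1 := by omega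
      have h3' : l.getD i ' ' = l.getD k ' ' := by
        rw [h3, show i + L - 1 = k by omega]
      have := hi0min i (by omega) h3'
      omega
  have hmax : bestLenK l (k+1)
      = max (bestLenK l k) (k + 1 - List.idxOf (l.getD k ' ') l) := by
    refine le_antisymm ?_ (max_le ?_ ?_)
    · obtain ⟨i, hi, hgs⟩ := bestLenK_spec l (k+1) (by omega)
      exact F2 i _ hi hgs
    · rcases Nat.eq_zero_or_pos k with hz | hpos
      · rw [hz, bestLenK_zero]; omega
      · obtain ⟨i, hi, hgs⟩ := bestLenK_spec l k hpos
        exact bestLenK_is_greatest l (k+1) _ ⟨i, by omega, gs_mono l k (k+1) i _ (by omega) hgs⟩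
    · exact bestLenK_is_greatest l (k+1) _ ⟨_, by omega, F1⟩
  constructor
  · intro hlt
    have hBL : bestLenK l (k+1) = k + 1 - List.idxOf (l.getD k ' ') l := by omega
    refine ⟨hBL, ?_⟩
    have hex : ∃ i, i < k + 1 ∧ gs l (k+1) i (bestLenK l (k+1)) :=
      bestLenK_spec l (k+1) (by omega)
    simp only [bestStartK, hBL] at hex ⊢
    rw [dif_pos hex, Nat.find_eq_iff]
    refine ⟨⟨by omega, F1⟩, ?_⟩
    intro n hn ⟨hlt2, hg1, hg2, hg3⟩
    rcases Nat.lt_or_ge (n + (k + 1 - List.idxOf (l.getD k ' ') l)) (k + 1) with hcase | hcase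
    · have : k + 1 - List.idxOf (l.getD k ' ') l ≤ bestLenK l k :=
        bestLenK_is_greatest l k _ ⟨n, by omega, hg1, by omega, hg3⟩
      omega
    · have h3' : l.getD n ' ' = l.getD k ' ' := by
        rw [hg3, show n + (k + 1 - List.idxOf (l.getD k ' ') l) - 1 = k by omega]
      have := hi0min n (by omega) h3'
      omega
  · intro hge
    have hpos : 0 < k := by
      by_contra hz
      have hk0 : k = 0 := by omega
      subst hk0
      rw [bestLenK_zero] at hge
      omega
    have hBL : bestLenK l (k+1) = bestLenK l k := by omega
    refine ⟨hBL, ?_⟩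
    obtain ⟨hBSlt, hBSgs, hBSmin⟩ := bestStartK_spec l k hpos
    have hex : ∃ i, i < k + 1 ∧ gs l (k+1) i (bestLenK l (k+1)) :=
      bestLenK_spec l (k+1) (by omega)
    simp only [bestStartK, hBL] at hex ⊢
    rw [dif_pos hex, Nat.find_eq_iff]
    have hexk : ∃ i, i < k ∧ gs l k i (bestLenK l k) := bestLenK_spec l k hpos
    rw [dif_pos hexk]
    refine ⟨⟨by have := (Nat.find_spec hexk).1; omega,
      gs_mono l k (k+1) _ _ (by omega) (by
        have h := (Nat.find_spec hexk).2
        exact h)⟩, ?_⟩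
    intro n hn ⟨hlt2, hg1, hg2, hg3⟩
    have hnfind : n < Nat.find hexk := hn
    rcases Nat.lt_or_ge (n + bestLenK l k) (k + 1) with hcase | hcase
    · exact Nat.find_min hexk hnfind ⟨by omega, hg1, by omega, hg3⟩
    · have h3' : l.getD n ' ' = l.getD k ' ' := by
        rw [hg3, show n + bestLenK l k - 1 = k by omega]
      have hi0n := hi0min n (by omega) h3'
      have hBS := (Nat.find_spec hexk).2.2.1
      omega

-- ---- A-side: the candidate list ----

lemma length_subw (l : List Char) (i n : Nat) :
    (subw l i n).length = min n (l.length - i) := by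
  simp [subw]

lemma head?_subw (l : List Char) (i n : Nat) (hi : i < l.length) (hn : 1 ≤ n) :
    (subw l i n).head? = some (l.getD i ' ') := by
  rw [List.head?_eq_getElem?, subw, List.getElem?_take_of_lt (by omega), List.getElem?_drop,
    Nat.add_zero, List.getElem?_eq_getElem hi, getD_eq_getElem' l i hi]

lemma getLast?_subw (l : List Char) (i n : Nat) (hi : i < l.length) (hn : 1 ≤ n) :
    (subw l i n).getLast? = some (l.getD (i + min n (l.length - i) - 1) ' ') := by
  have hidx : i + min n (l.length - i) - 1 < l.length := by omega
  rw [List.getLast?_eq_getElem?, length_subw, subw,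
    List.getElem?_take_of_lt (by omega), List.getElem?_drop,
    show i + (min n (l.length - i) - 1) = i + min n (l.length - i) - 1 by omega,
    List.getElem?_eq_getElem hidx, getD_eq_getElem' l _ hidx]

lemma condW_eq (w : List Char) (a b : Char) (h1 : w.head? = some a)
    (h2 : w.getLast? = some b) : condW w = (a == b) := by
  simp [condW, h1, h2]

lemma condW_subw_iff (l : List Char) (i n : Nat) (hi : i < l.length) (hn : 1 ≤ n) :
    condW (subw l i n) = true ↔
      l.getD i ' ' = l.getD (i + min n (l.length - i) - 1) ' ' := by
  rw [condW_eq _ _ _ (head?_subw l i n hi hn) (getLast?_subw l i n hi hn)]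
  simp

lemma innerA (l : List Char) (n : Nat) (hn : 1 ≤ n) (acc : List (List Char)) :
    (PySem.List.pyRange 0 (l.length : Int)).foldl (fun acc2 i =>
      let sub := PySem.List.slice l (some i) (some (i + (n : Int)))
      match PySem.List.pyGet? sub 0, PySem.List.pyGet? sub (-1) with
      | some a, some b => if a == b then acc2 ++ [sub] else acc2
      | _, _ => acc2) acc = acc ++ blockL l n := by
  rw [PySem.List.pyRange_one, List.foldl_map]
  simp only [Int.sub_zero, Int.toNat_natCast, zero_add]
  rw [PySem.List.foldl_congr_mem _ _
      (fun acc2 k => if condW (subw l k n) then acc2 ++ [subw l k n] else acc2) acc ?_]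
  · rw [PySem.List.foldl_append_if]
    rfl
  · intro acc2 k hk
    rw [List.mem_range] at hk
    have hsub : PySem.List.slice l (some (k : Int)) (some ((k : Int) + (n : Int))) = subw l k n :=
      PySem.List.slice_natCast_add l k n
    have hne : subw l k n ≠ [] := by
      have : (subw l k n).length = min n (l.length - k) := by simp [subw]
      intro h; rw [h] at this; simp at this; omega
    obtain ⟨a, ha⟩ := Option.ne_none_iff_exists'.mp (fun h => hne (List.head?_eq_none_iff.mp h))
    obtain ⟨b, hb⟩ := Option.ne_none_iff_exists'.mp (fun h => hne (List.getLast?_eq_none_iff.mp h))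
    simp only [hsub, PySem.List.pyGet?_zero, PySem.List.pyGet?_neg_one,
      ← List.head?_eq_getElem?, ha, hb, condW_eq _ _ _ ha hb]

lemma podslA (l : List Char) :
    (PySem.List.pyRange 1 ((l.length : Int) + 1)).foldl (fun acc n =>
      (PySem.List.pyRange 0 (l.length : Int)).foldl (fun acc2 i =>
        let sub := PySem.List.slice l (some i) (some (i + n))
        match PySem.List.pyGet? sub 0, PySem.List.pyGet? sub (-1) with
        | some a, some b => if a == b then acc2 ++ [sub] else acc2
        | _, _ => acc2) acc) [] = cands l := by
  rw [PySem.List.pyRange_one 1 ((l.length : Int) + 1), List.foldl_map]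
  rw [PySem.List.foldl_congr_mem _ _ (fun acc m => acc ++ blockL l (m + 1)) [] ?_]
  · rw [PySem.List.foldl_append_eq_flatMap]
    simp only [add_sub_cancel_right, Int.toNat_natCast, List.nil_append]
    rfl
  · intro acc m _
    have hcast : (1 : Int) + (m : Int) = ((m + 1 : Nat) : Int) := by push_cast; ring
    rw [hcast]
    exact innerA l (m + 1) (by omega) acc

-- every candidate is at most the best span length
lemma mem_cands_le (l : List Char) (w : List Char) (hw : w ∈ cands l) :
    w.length ≤ bestLenK l l.length := by
  obtain ⟨m, _, hwb⟩ := List.mem_flatMap.mp hw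
  obtain ⟨i, hif, rfl⟩ := List.mem_map.mp hwb
  have hi := List.mem_filter.mp hif
  have hil : i < l.length := List.mem_range.mp hi.1
  have hgd := (condW_subw_iff l i (m + 1) hil (by omega)).1 hi.2
  rw [length_subw]
  exact bestLenK_is_greatest l l.length _ ⟨i, hil, by omega, by omega, hgd⟩

-- the candidate list splits at the best window, everything before it strictly shorter
lemma range_split_at (n s : Nat) (h : s < n) :
    List.range n = List.range s ++ s :: (List.range (n - s - 1)).map (fun t => s + 1 + t) := by
  conv_lhs => rw [show n = s + (n - s - 1 + 1) by omega]
  rw [List.range_add, List.range_succ_eq_map]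
  simp only [List.map_cons, Nat.add_zero, List.map_map]
  refine congrArg _ (congrArg _ (List.map_congr_left fun t _ => ?_))
  simp only [Function.comp_apply]
  omega

lemma cands_split (l : List Char) (h : l ≠ []) :
    ∃ pre suf, cands l = pre ++ subw l (bestStartK l l.length) (bestLenK l l.length) :: suf ∧
      ∀ y ∈ pre, y.length < bestLenK l l.length := by
  have hlen1 : 1 ≤ l.length := List.length_pos_of_ne_nil h
  have hBL1 := bestLenK_pos l l.length hlen1
  have hBLle := bestLenK_le l l.length
  obtain ⟨hBSlt, hBSgs, hBSmin⟩ := bestStartK_spec l l.length hlen1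
  obtain ⟨-, hBSle, hBSgd⟩ := hBSgs
  have hp : condW (subw l (bestStartK l l.length) (bestLenK l l.length)) = true := by
    rw [condW_subw_iff _ _ _ (by omega) (by omega),
      show min (bestLenK l l.length) (l.length - bestStartK l l.length) = bestLenK l l.length
        by omega]
    exact hBSgd
  refine ⟨(List.range (bestLenK l l.length - 1)).flatMap (fun m => blockL l (m + 1))
      ++ ((List.range (bestStartK l l.length)).filter
            (fun i => condW (subw l i (bestLenK l l.length)))).map
          (fun i => subw l i (bestLenK l l.length)),
    (((List.range (l.length - bestStartK l l.length - 1)).map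
        (fun t => bestStartK l l.length + 1 + t)).filter
          (fun i => condW (subw l i (bestLenK l l.length)))).map
        (fun i => subw l i (bestLenK l l.length))
      ++ ((List.range (l.length - (bestLenK l l.length - 1) - 1)).map
            (fun t => bestLenK l l.length - 1 + 1 + t)).flatMap (fun m => blockL l (m + 1)),
    ?_, ?_⟩
  · rw [cands, range_split_at l.length (bestLenK l l.length - 1) (by omega),
      List.flatMap_append, List.flatMap_cons, Nat.sub_add_cancel hBL1]
    conv_lhs => rw [blockL, range_split_at l.length (bestStartK l l.length) hBSlt]
    rw [List.filter_append]
    simp only [List.filter_cons, hp, if_true, List.map_append, List.map_cons]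
    simp [List.append_assoc]
  · intro y hy
    rcases List.mem_append.mp hy with hy | hy
    · obtain ⟨m, hm, hyb⟩ := List.mem_flatMap.mp hy
      obtain ⟨i, _, rfl⟩ := List.mem_map.mp hyb
      rw [List.mem_range] at hm
      rw [length_subw]
      omega
    · obtain ⟨i, hif, rfl⟩ := List.mem_map.mp hy
      have hi := List.mem_filter.mp hif
      have hiBS : i < bestStartK l l.length := List.mem_range.mp hi.1
      have hil : i < l.length := by omega
      have hgd := (condW_subw_iff l i (bestLenK l l.length) hil (by omega)).1 hi.2
      rw [length_subw]
      rcases Nat.lt_or_ge (min (bestLenK l l.length) (l.length - i)) (bestLenK l l.length)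
        with hlt | hge
      · exact hlt
      · exfalso
        have hmin : min (bestLenK l l.length) (l.length - i) = bestLenK l l.length := by omega
        rw [hmin] at hgd
        exact hBSmin i hiBS ⟨by omega, by omega, hgd⟩

-- A's len/max/index tail picks the first element of maximal length
lemma tailA_eq (P : List (List Char)) (w : List Char) (pre suf : List (List Char))
    (hP : P = pre ++ w :: suf)
    (hpre : ∀ y ∈ pre, y.length < w.length)
    (hall : ∀ y ∈ P, y.length ≤ w.length) :
    (match PySem.List.max? (P.foldl (fun acc x => acc ++ [(x.length : Int)]) []) (fun x => x) with
     | some m =>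
       match PySem.List.index? (P.foldl (fun acc x => acc ++ [(x.length : Int)]) []) m with
       | some k => String.ofList ((PySem.List.pyGet? P (k : Int)).getD [])
       | none => ""
     | none => "") = String.ofList w := by
  have hdl : P.foldl (fun acc x => acc ++ [(x.length : Int)]) []
      = P.map (fun x => (x.length : Int)) := by
    rw [PySem.List.foldl_append_singleton_eq_map]; rfl
  have hwP : w ∈ P := by rw [hP]; simp
  have hmax : PySem.List.max? (P.map (fun x => (x.length : Int))) (fun x => x)
      = some ((w.length : Int)) := by
    cases hm : PySem.List.max? (P.map (fun x => (x.length : Int))) (fun x => x) with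
    | none =>
        rw [PySem.List.max?_eq_none_iff] at hm
        simp [hP] at hm
    | some m =>
        have hmem := PySem.List.max?_mem hm
        have hisMax := PySem.List.max?_isMax hm
        obtain ⟨y, hy, hym⟩ := List.mem_map.mp hmem
        have h1 : m ≤ (w.length : Int) := by
          rw [← hym]; exact_mod_cast Int.ofNat_le.mpr (hall y hy)
        have h2 : (w.length : Int) ≤ m :=
          hisMax _ (List.mem_map.mpr ⟨w, hwP, rfl⟩)
        rw [le_antisymm h1 h2]
  have hidx : PySem.List.index? (P.map (fun x => (x.length : Int))) ((w.length : Int))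
      = some pre.length := by
    rw [PySem.List.index?_eq_some_iff]
    refine ⟨pre.map (fun x => (x.length : Int)), suf.map (fun x => (x.length : Int)),
      by rw [hP]; simp, by simp, ?_⟩
    intro hmem
    obtain ⟨y, hy, hym⟩ := List.mem_map.mp hmem
    have := hpre y hy
    omega
  have hget : PySem.List.pyGet? P ((pre.length : Nat) : Int) = some w := by
    rw [hP]; exact PySem.List.pyGet?_append_length pre suf w
  rw [hdl, hmax]
  simp only [hidx, hget, Option.getD_some]

lemma A_char (s : String) (h : s.toList ≠ []) :
    MAXX s = String.ofList
      (subw s.toList (bestStartK s.toList s.toList.length) (bestLenK s.toList s.toList.length)) := by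
  obtain ⟨pre, suf, hsplit, hpre⟩ := cands_split s.toList h
  have hlen1 : 1 ≤ s.toList.length := List.length_pos_of_ne_nil h
  obtain ⟨-, ⟨-, hBSle, -⟩, -⟩ := bestStartK_spec s.toList s.toList.length hlen1
  have hwlen : (subw s.toList (bestStartK s.toList s.toList.length)
      (bestLenK s.toList s.toList.length)).length = bestLenK s.toList s.toList.length := by
    rw [length_subw]; omega
  simp only [MAXX]
  rw [podslA s.toList]
  exact tailA_eq (cands s.toList) _ pre suf hsplit
    (fun y hy => by rw [hwlen]; exact hpre y hy)
    (fun y hy => by rw [hwlen]; exact mem_cands_le s.toList y hy)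

-- ---- B-side ----

def stepB (acc : PySem.Dict Char Int × Int × Int) (jc : Int × Char) :
    PySem.Dict Char Int × Int × Int :=
  let i := (acc.1.get? jc.2).getD jc.1
  let first := acc.1.setdefault jc.2 jc.1
  if acc.2.1 < jc.1 - i + 1 then (first, jc.1 - i + 1, i) else (first, acc.2)

lemma B_inv (l : List Char) (k : Nat) (hk : k ≤ l.length) :
    (∀ c, ((PySem.List.enumerate (l.take k)).foldl stepB (PySem.Dict.empty, 0, 0)).1.get? c
        = if c ∈ l.take k then some ((List.idxOf c l : Int)) else none)
  ∧ ((PySem.List.enumerate (l.take k)).foldl stepB (PySem.Dict.empty, 0, 0)).2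
      = ((bestLenK l k : Int), (bestStartK l k : Int)) := by
  induction k with
  | zero =>
      simp [PySem.List.enumerate_nil, PySem.Dict.get?_empty, bestStartK_zero]
  | succ k ih =>
      have hk' : k ≤ l.length := by omega
      have hklt : k < l.length := by omega
      obtain ⟨ihd, ihb⟩ := ih hk'
      have htake := List.take_succ_eq_append_getElem hklt
      have hlen_take : (l.take k).length = k := by simp [List.length_take]; omega
      have henum : PySem.List.enumerate (l.take (k+1))
          = PySem.List.enumerate (l.take k) ++ [((k : Int), l[k])] := by
        rw [htake, PySem.List.enumerate_append]
        simp [PySem.List.enumerate_cons, PySem.List.enumerate_nil, hlen_take]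
      rw [henum, List.foldl_append]
      set st := (PySem.List.enumerate (l.take k)).foldl stepB (PySem.Dict.empty, 0, 0) with hst
      have hgetk : l.getD k ' ' = l[k] := getD_eq_getElem' l k hklt
      have hi0le : List.idxOf (l.getD k ' ') l ≤ k :=
        idxOf_le_of_getElem l _ k hklt hgetk.symm
      have hi0 : (st.1.get? l[k]).getD (k : Int)
          = ((List.idxOf (l.getD k ' ') l : Nat) : Int) := by
        rw [ihd]
        by_cases hc : l[k] ∈ l.take k
        · rw [if_pos hc, hgetk]
          simp
        · rw [if_neg hc]
          have h2 : ¬ (List.idxOf (l[k]) l < k) := fun hlt =>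
            hc ((List.mem_take_iff_idxOf_lt (List.getElem_mem hklt)).mpr hlt)
          rw [hgetk]
          have h1 : List.idxOf (l[k]) l ≤ k := idxOf_le_of_getElem l _ k hklt rfl
          simp only [Option.getD_none]
          congr 1
          omega
      have hfst : (stepB st ((k : Int), l[k])).1 = st.1.setdefault l[k] (k : Int) := by
        simp only [stepB]
        split <;> rfl
      constructor
      · intro c
        rw [List.foldl_cons, List.foldl_nil, hfst]
        by_cases hcc : c = l[k]
        · subst hcc
          rw [PySem.Dict.get?_setdefault_self, hi0,
            if_pos (by rw [htake]; exact List.mem_append.mpr (Or.inr (List.mem_singleton.mpr rfl)))]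
          rw [hgetk]
        · rw [PySem.Dict.get?_setdefault_of_ne _ _ hcc, ihd]
          have hmem : (c ∈ l.take (k+1)) ↔ (c ∈ l.take k) := by
            rw [htake]
            constructor
            · intro h
              rcases List.mem_append.mp h with h | h
              · exact h
              · exact absurd (List.mem_singleton.mp h) hcc
            · exact fun h => List.mem_append.mpr (Or.inl h)
          rw [if_congr hmem rfl rfl]
      · rw [List.foldl_cons, List.foldl_nil]
        have hcast : (k : Int) - ((List.idxOf (l.getD k ' ') l : Nat) : Int) + 1
            = ((k + 1 - List.idxOf (l.getD k ' ') l : Nat) : Int) := by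
          omega
        have hsnd : (stepB st ((k : Int), l[k])).2
            = if st.2.1 < (k : Int) - ((st.1.get? l[k]).getD (k : Int)) + 1
              then ((k : Int) - ((st.1.get? l[k]).getD (k : Int)) + 1,
                    (st.1.get? l[k]).getD (k : Int))
              else st.2 := by
          simp only [stepB]
          split <;> rfl
        have ihb1 : st.2.1 = (bestLenK l k : Int) := by rw [ihb]
        rw [hsnd, hi0, hcast, ihb1]
        by_cases hlt : bestLenK l k < k + 1 - List.idxOf (l.getD k ' ') l
        · rw [if_pos (by exact_mod_cast hlt)]
          obtain ⟨h1, h2⟩ := (step_best l k hklt).1 hlt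
          rw [h1, h2]
        · rw [if_neg (by
            intro hcon
            exact hlt (by exact_mod_cast hcon)), ihb]
          obtain ⟨h1, h2⟩ := (step_best l k hklt).2 (by omega)
          rw [h1, h2]

lemma B_char (s : String) :
    (MAXX_alt s).toList =
      subw s.toList (bestStartK s.toList s.toList.length) (bestLenK s.toList s.toList.length) := by
  obtain ⟨-, hb⟩ := B_inv s.toList s.toList.length (le_refl _)
  rw [List.take_length] at hb
  simp only [MAXX_alt]
  rw [show (fun (acc : PySem.Dict Char Int × Int × Int) (jc : Int × Char) =>
        let i := (acc.1.get? jc.2).getD jc.1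
        let first := acc.1.setdefault jc.2 jc.1
        if acc.2.1 < jc.1 - i + 1 then (first, jc.1 - i + 1, i) else (first, acc.2))
      = stepB from rfl]
  rw [hb]
  rw [PySem.Str.toList_slice, PySem.Chars.slice_eq_listSlice]
  exact PySem.List.slice_natCast_add s.toList _ _

-- ===== VERDICT (by name: the statement is the Claim_ definition above) =====
theorem MAXX_spec : Claim_equal_MAXX := by
  intro s _ hpre
  unfold Spec_MAXX
  have h : s.toList ≠ [] := by
    intro hnil
    have := congrArg String.ofList hnil
    rw [String.ofList_toList] at this
    exact hpre (by simpa using this)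
  rw [A_char s h, ← B_char s, String.ofList_toList]
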